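-- pv_equiv track=rewrite | github.com/ictcubeMENA/Training_one | codewars/7kyu/doha22/max_lenght/max_lenght.py | mxdiflg
-- ===== SOURCE A (Python) =====
-- def mxdiflg(a1, a2):
--     if a1 and a2:
--         res1 = max([len(x) for x in a1])
--         res11 = min([len(x) for x in a1])
--         res2 = max([len(x) for x in a2])
--         res22 = min([len(x) for x in a2])
--         return max(res1 - res22, res2 - res11)
--     else:
--         return -1
-- ===== SOURCE B (Python) =====
-- def mxdiflg(a1, a2):
--     if a1 and a2:
--         return max(abs(len(x) - len(y)) for x in a1 for y in a2)
--     else: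
--         return -1
-- ===== Notes on version B (the rewrite author's own statement) =====
-- stated objective: alternative
-- what changed: Instead of computing the four per-list extremes (max/min length of each list) and combining them, B takes the maximum absolute length difference directly over all pairs (x,y) in a1 x a2, which equals max(max1-min2, max2-min1).
import Mathlib
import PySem

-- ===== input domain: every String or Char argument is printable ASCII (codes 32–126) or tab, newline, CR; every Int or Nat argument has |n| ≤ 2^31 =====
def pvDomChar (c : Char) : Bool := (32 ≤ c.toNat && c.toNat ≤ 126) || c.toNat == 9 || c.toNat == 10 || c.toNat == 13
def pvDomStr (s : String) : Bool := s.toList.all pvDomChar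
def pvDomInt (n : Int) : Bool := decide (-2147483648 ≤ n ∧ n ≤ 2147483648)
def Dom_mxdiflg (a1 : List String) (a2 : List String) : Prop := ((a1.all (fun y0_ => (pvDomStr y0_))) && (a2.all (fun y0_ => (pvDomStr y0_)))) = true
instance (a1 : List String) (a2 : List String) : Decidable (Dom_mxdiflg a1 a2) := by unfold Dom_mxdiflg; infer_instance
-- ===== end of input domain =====

-- B replaces A's four per-list extremes with the max absolute length difference over all pairs (objective: alternative; B is O(n*m), not faster).

-- ===== PORT A =====
-- literal port of A: four comprehensions, max/min of each; the guard ensures the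
-- lists are nonempty so max?/min? are `some`, read off with getD (never hit).
def mxdiflg (a1 : List String) (a2 : List String) : Int :=
  if !a1.isEmpty && !a2.isEmpty then
    let res1 := (PySem.List.max? (a1.map (fun x => PySem.Str.len x)) (fun y => y)).getD 0
    let res11 := (PySem.List.min? (a1.map (fun x => PySem.Str.len x)) (fun y => y)).getD 0
    let res2 := (PySem.List.max? (a2.map (fun x => PySem.Str.len x)) (fun y => y)).getD 0
    let res22 := (PySem.List.min? (a2.map (fun x => PySem.Str.len x)) (fun y => y)).getD 0
    max (res1 - res22) (res2 - res11)
  else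
    -1

-- ===== PORT B =====
-- max over the generator (abs(len x - len y) for x in a1 for y in a2); the guard
-- ensures the pair list is nonempty so max? is `some`, read off with getD (never hit).
def mxdiflg_alt (a1 : List String) (a2 : List String) : Int :=
  if !a1.isEmpty && !a2.isEmpty then
    (PySem.List.max?
      (a1.flatMap (fun x => a2.map (fun y => |PySem.Str.len x - PySem.Str.len y|)))
      (fun y => y)).getD 0
  else
    -1

-- ===== PRECONDITION & SPEC =====
def Spec_mxdiflg (a1 : List String) (a2 : List String) (out : Int) : Prop := out = mxdiflg_alt a1 a2
instance (a1 : List String) (a2 : List String) (out : Int) : Decidable (Spec_mxdiflg a1 a2 out) := by unfold Spec_mxdiflg; infer_instance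

-- ===== CLAIM (what is proved, stated in full; the proofs are below) =====
def Claim_equal_mxdiflg : Prop := ∀ (a1 : List String) (a2 : List String), Dom_mxdiflg a1 a2 → Spec_mxdiflg a1 a2 (mxdiflg a1 a2)

-- ===== LEMMAS AND PROOFS =====

-- the max over all pairwise absolute differences equals max(max1-min2, max2-min1)
theorem pairMax_eq (L1 L2 : List Int) (m1 n1 m2 n2 : Int)
    (hm1 : PySem.List.max? L1 (fun y => y) = some m1)
    (hn1 : PySem.List.min? L1 (fun y => y) = some n1)
    (hm2 : PySem.List.max? L2 (fun y => y) = some m2)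
    (hn2 : PySem.List.min? L2 (fun y => y) = some n2) :
    ∀ d, PySem.List.max? (L1.flatMap (fun x => L2.map (fun y => |x - y|))) (fun y => y) = some d →
      d = max (m1 - n2) (m2 - n1) := by
  intro d hd
  have hdmem := PySem.List.max?_mem hd
  have hdmax := PySem.List.max?_isMax hd
  -- d is some |x - y| with x ∈ L1, y ∈ L2
  simp only [List.mem_flatMap, List.mem_map] at hdmem
  obtain ⟨x, hx, y, hy, hxy⟩ := hdmem
  have hx1 : x ≤ m1 := PySem.List.max?_isMax hm1 x hx
  have hx2 : n1 ≤ x := PySem.List.min?_isMin hn1 x hx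
  have hy1 : y ≤ m2 := PySem.List.max?_isMax hm2 y hy
  have hy2 : n2 ≤ y := PySem.List.min?_isMin hn2 y hy
  -- upper bound: d = |x - y| ≤ max (m1 - n2) (m2 - n1)
  have hub : d ≤ max (m1 - n2) (m2 - n1) := by
    subst hxy
    rcases abs_cases (x - y) with ⟨h, _⟩ | ⟨h, _⟩ <;> rw [h] <;> omega
  -- lower bound: both candidates are ≤ d since their witnessing pairs are in the list
  have hm1m : m1 ∈ L1 := PySem.List.max?_mem hm1
  have hn1m : n1 ∈ L1 := PySem.List.min?_mem hn1
  have hm2m : m2 ∈ L2 := PySem.List.max?_mem hm2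
  have hn2m : n2 ∈ L2 := PySem.List.min?_mem hn2
  have h1 : |m1 - n2| ≤ d := by
    apply hdmax
    simp only [List.mem_flatMap, List.mem_map]
    exact ⟨m1, hm1m, n2, hn2m, rfl⟩
  have h2 : |n1 - m2| ≤ d := by
    apply hdmax
    simp only [List.mem_flatMap, List.mem_map]
    exact ⟨n1, hn1m, m2, hm2m, rfl⟩
  have h1' : m1 - n2 ≤ d := le_trans (le_abs_self _) h1
  have h2' : m2 - n1 ≤ d := le_trans (by rw [abs_sub_comm]; exact le_abs_self _) h2
  omega

-- the whole identity at the level of length lists: A's four-extremes combination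
-- equals the max over all pairwise absolute differences
theorem key_eq (x1 x2 : Int) (t1 t2 : List Int) :
    max ((PySem.List.max? (x1 :: t1) (fun y => y)).getD 0 - (PySem.List.min? (x2 :: t2) (fun y => y)).getD 0)
        ((PySem.List.max? (x2 :: t2) (fun y => y)).getD 0 - (PySem.List.min? (x1 :: t1) (fun y => y)).getD 0)
      = (PySem.List.max? ((x1 :: t1).flatMap (fun a => (x2 :: t2).map (fun b => |a - b|))) (fun y => y)).getD 0 := by
  have hm1 := PySem.List.max?_id_cons x1 t1
  have hn1 := PySem.List.min?_id_cons x1 t1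
  have hm2 := PySem.List.max?_id_cons x2 t2
  have hn2 := PySem.List.min?_id_cons x2 t2
  obtain ⟨d, hd⟩ : ∃ d, PySem.List.max? ((x1 :: t1).flatMap (fun a => (x2 :: t2).map (fun b => |a - b|))) (fun y => y) = some d := by
    rcases hcase : PySem.List.max? ((x1 :: t1).flatMap (fun a => (x2 :: t2).map (fun b => |a - b|))) (fun y => y) with _ | d
    · rw [PySem.List.max?_eq_none_iff] at hcase
      simp at hcase
    · exact ⟨d, rfl⟩
  have hdval := pairMax_eq (x1 :: t1) (x2 :: t2) _ _ _ _ hm1 hn1 hm2 hn2 d hd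
  rw [hd, hm1, hn1, hm2, hn2]
  simp [hdval]

-- ===== VERDICT (by name: the statement is the Claim_ definition above) =====
theorem mxdiflg_spec : Claim_equal_mxdiflg := by
  intro a1 a2 _
  unfold Spec_mxdiflg mxdiflg mxdiflg_alt
  match a1, a2 with
  | [], _ => simp
  | h1 :: t1, [] => simp
  | h1 :: t1, h2 :: t2 =>
    simp only [List.isEmpty_cons, Bool.not_false, Bool.and_self, if_true]
    -- B's flatMap over strings is the flatMap over the mapped length lists
    have hB : ((h1 :: t1).flatMap (fun x => (h2 :: t2).map (fun y => |PySem.Str.len x - PySem.Str.len y|)))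
        = (((h1 :: t1).map (fun x => PySem.Str.len x)).flatMap
            (fun a => (((h2 :: t2).map (fun x => PySem.Str.len x))).map (fun b => |a - b|))) := by
      simp [List.flatMap_map, List.map_map, Function.comp_def]
    rw [hB]
    exact key_eq (PySem.Str.len h1) (PySem.Str.len h2) (t1.map (fun x => PySem.Str.len x)) (t2.map (fun x => PySem.Str.len x))
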